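-- pv_equiv track=rewrite | github.com/Checkmk/checkmk | cmk/base/legacy_checks/tsm_sessions.py | check_tsm_sessions
-- ===== SOURCE A (Python) =====
-- def saveint(i: str) -> int:
--     """Tries to cast a string to an integer and return it. In case this
--     fails, it returns 0.
--
--     Advice: Please don't use this function in new code. It is understood as
--     bad style these days, because in case you get 0 back from this function,
--     you can not know whether it is really 0 or something went wrong."""
--     try:
--         return int(i)
--     except (TypeError, ValueError):
--         return 0
--
-- def check_tsm_sessions(item, _no_params, info):
--     state = 0
--     warn, crit = 300, 600
--     count = 0
--     for entry in info:
--         if len(entry) == 4: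
--             _sid, _client_name, proc_state, wait = entry
--         elif len(entry) > 4:
--             proc_state, wait = entry[-2:]
--         else:
--             _sid, proc_state, wait = entry
--
--         if proc_state in ["RecvW", "MediaW"]:
--             wait = saveint(wait)
--             if wait >= crit:
--                 state = 2
--                 count += 1
--             elif wait >= warn:
--                 state = max(state, 1)
--                 count += 1
--     return state, "%d sessions too long in RecvW or MediaW state" % count
-- ===== SOURCE B (Python) =====
-- def saveint(i: str) -> int:
--     try:
--         return int(i)
--     except (TypeError, ValueError):
--         return 0
--
--
-- def check_tsm_sessions(item, _no_params, info):
--     warn, crit = 300, 600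
--     waits = []
--     for entry in info:
--         if len(entry) == 4:
--             _sid, _client_name, proc_state, wait = entry
--         elif len(entry) > 4:
--             proc_state, wait = entry[-2:]
--         else:
--             _sid, proc_state, wait = entry
--         if proc_state in ("RecvW", "MediaW"):
--             waits.append(saveint(wait))
--     count = sum(1 for w in waits if w >= warn)
--     state = 2 if any(w >= crit for w in waits) else 1 if any(w >= warn for w in waits) else 0
--     return state, "%d sessions too long in RecvW or MediaW state" % count
-- ===== Notes on version B (the rewrite author's own statement) =====
-- stated objective: simpler
-- what changed: Replaces the single loop that threads mutable state/count logic with elif branches by a build-then-reduce decomposition: collect the waits of RecvW/MediaW sessions into a list, then compute the count and the state with sum/any reductions.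
import Mathlib
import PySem

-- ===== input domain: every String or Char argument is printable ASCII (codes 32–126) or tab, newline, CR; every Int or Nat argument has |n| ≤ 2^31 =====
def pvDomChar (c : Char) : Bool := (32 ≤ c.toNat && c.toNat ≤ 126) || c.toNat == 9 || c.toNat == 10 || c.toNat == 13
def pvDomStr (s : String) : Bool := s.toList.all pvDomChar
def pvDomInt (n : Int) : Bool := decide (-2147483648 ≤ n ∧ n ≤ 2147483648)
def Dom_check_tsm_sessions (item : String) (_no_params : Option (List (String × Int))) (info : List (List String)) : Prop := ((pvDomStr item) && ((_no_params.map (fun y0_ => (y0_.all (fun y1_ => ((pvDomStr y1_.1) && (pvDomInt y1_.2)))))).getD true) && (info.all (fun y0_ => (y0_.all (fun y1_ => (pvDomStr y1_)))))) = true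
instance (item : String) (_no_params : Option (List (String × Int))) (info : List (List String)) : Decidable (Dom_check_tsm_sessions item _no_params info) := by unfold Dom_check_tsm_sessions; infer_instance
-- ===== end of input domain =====

-- B replaces A's single loop threading a mutable (state, count) pair through elif branches
-- by a simpler build-then-reduce decomposition: collect the relevant waits, then reduce with sum/any.

-- ===== PORT A =====

-- saveint: int(i) with ValueError mapped to 0 (PySem.Int.ofStr? is exact int(s))
def tsmSaveint (s : String) : Int := (PySem.Int.ofStr? s).getD 0

-- the length-based unpacking both Pythons share verbatim (Pre_ rules out len < 3, where
-- Python's tuple unpacking raises ValueError; the .getD "" defaults are then unreachable)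
def tsmUnpack (entry : List String) : String × String :=
  if entry.length == 4 then
    ((PySem.List.pyGet? entry 2).getD "", (PySem.List.pyGet? entry 3).getD "")
  else if entry.length > 4 then
    ((PySem.List.pyGet? entry (-2)).getD "", (PySem.List.pyGet? entry (-1)).getD "")
  else
    ((PySem.List.pyGet? entry 1).getD "", (PySem.List.pyGet? entry 2).getD "")

def check_tsm_sessions (item : String) (_no_params : Option (List (String × Int))) (info : List (List String)) : Int × String :=
  let r : Int × Int := info.foldl (fun sc entry =>
    let pw := tsmUnpack entry
    if pw.1 == "RecvW" || pw.1 == "MediaW" then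
      let w := tsmSaveint pw.2
      if w ≥ 600 then (2, sc.2 + 1)
      else if w ≥ 300 then (max sc.1 1, sc.2 + 1)
      else sc
    else sc) ((0 : Int), (0 : Int))
  (r.1, PySem.Int.toStr r.2 ++ " sessions too long in RecvW or MediaW state")

-- ===== PORT B =====
def check_tsm_sessions_alt (item : String) (_no_params : Option (List (String × Int))) (info : List (List String)) : Int × String :=
  let waits : List Int := info.foldl (fun ws entry =>
    let pw := tsmUnpack entry
    if pw.1 == "RecvW" || pw.1 == "MediaW" then ws ++ [tsmSaveint pw.2] else ws) []
  let count : Int := (waits.map (fun w => if w ≥ 300 then (1 : Int) else 0)).sum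
  let state : Int :=
    if waits.any (fun w => decide (w ≥ 600)) then 2
    else if waits.any (fun w => decide (w ≥ 300)) then 1
    else 0
  (state, PySem.Int.toStr count ++ " sessions too long in RecvW or MediaW state")

-- ===== PRECONDITION & SPEC =====
-- Pre_ excludes entries of length < 3, on which Python's tuple unpacking raises ValueError in both A and B.
def Pre_check_tsm_sessions (item : String) (_no_params : Option (List (String × Int))) (info : List (List String)) : Prop :=
  ∀ entry ∈ info, 3 ≤ entry.length
instance (item : String) (_no_params : Option (List (String × Int))) (info : List (List String)) : Decidable (Pre_check_tsm_sessions item _no_params info) := by unfold Pre_check_tsm_sessions; infer_instance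

def pvWitness_check_tsm_sessions : String × (Option (List (String × Int))) × List (List String) :=
  ("tsm", none, [["1", "client", "RecvW", "700"], ["2", "MediaW", "300"]])

def Spec_check_tsm_sessions (item : String) (_no_params : Option (List (String × Int))) (info : List (List String)) (out : Int × String) : Prop := out = check_tsm_sessions_alt item _no_params info
instance (item : String) (_no_params : Option (List (String × Int))) (info : List (List String)) (out : Int × String) : Decidable (Spec_check_tsm_sessions item _no_params info out) := by unfold Spec_check_tsm_sessions; infer_instance

-- ===== CLAIM (what is proved, stated in full; the proofs are below) =====
def Claim_equal_check_tsm_sessions : Prop := ∀ (item : String) (_no_params : Option (List (String × Int))) (info : List (List String)), Dom_check_tsm_sessions item _no_params info → Pre_check_tsm_sessions item _no_params info → Spec_check_tsm_sessions item _no_params info (check_tsm_sessions item _no_params info)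

-- ===== LEMMAS AND PROOFS =====

-- the list of waits B collects, in closed form
def tsmWaits (info : List (List String)) : List Int :=
  info.filterMap (fun entry =>
    let pw := tsmUnpack entry
    if pw.1 == "RecvW" || pw.1 == "MediaW" then some (tsmSaveint pw.2) else none)

lemma tsmWaits_cons (e : List String) (info : List (List String)) :
    tsmWaits (e :: info) =
      (let pw := tsmUnpack e
       if pw.1 == "RecvW" || pw.1 == "MediaW" then tsmSaveint pw.2 :: tsmWaits info else tsmWaits info) := by
  simp only [tsmWaits, List.filterMap_cons]
  split <;> simp_all

lemma bfold_eq (info : List (List String)) : ∀ (ws : List Int),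
    info.foldl (fun ws entry =>
      let pw := tsmUnpack entry
      if pw.1 == "RecvW" || pw.1 == "MediaW" then ws ++ [tsmSaveint pw.2] else ws) ws
      = ws ++ tsmWaits info := by
  induction info with
  | nil => simp [tsmWaits]
  | cons e rest ih =>
    intro ws
    rw [List.foldl_cons, tsmWaits_cons]
    by_cases h : ((tsmUnpack e).1 == "RecvW" || (tsmUnpack e).1 == "MediaW") = true
    · simp only [h, if_true, ih, List.append_assoc, List.singleton_append]
    · rw [Bool.not_eq_true] at h
      simp only [h, Bool.false_eq_true, if_false, ih]

def tsmCnt (ws : List Int) : Int := (ws.map (fun w => if w ≥ 300 then (1 : Int) else 0)).sum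

def tsmSt (s : Int) (ws : List Int) : Int :=
  if ws.any (fun w => decide (w ≥ 600)) then 2
  else if ws.any (fun w => decide (w ≥ 300)) then max s 1
  else s

lemma tsmCnt_cons (w : Int) (ws : List Int) :
    tsmCnt (w :: ws) = (if w ≥ 300 then (1 : Int) else 0) + tsmCnt ws := by
  simp [tsmCnt]

lemma tsmSt_cons (s w : Int) (ws : List Int) :
    tsmSt (if w ≥ 600 then 2 else if w ≥ 300 then max s 1 else s) ws = tsmSt s (w :: ws) := by
  unfold tsmSt
  by_cases h6 : w ≥ 600 <;> by_cases h3 : w ≥ 300 <;>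
    simp [h6, h3] <;> split_ifs <;> simp_all [max_def]

lemma afold_eq (info : List (List String)) : ∀ (s c : Int),
    info.foldl (fun sc entry =>
      let pw := tsmUnpack entry
      if pw.1 == "RecvW" || pw.1 == "MediaW" then
        let w := tsmSaveint pw.2
        if w ≥ 600 then ((2 : Int), sc.2 + 1)
        else if w ≥ 300 then (max sc.1 1, sc.2 + 1)
        else sc
      else sc) (s, c)
      = (tsmSt s (tsmWaits info), c + tsmCnt (tsmWaits info)) := by
  induction info with
  | nil => intro s c; simp [tsmWaits, tsmSt, tsmCnt]
  | cons e rest ih =>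
    intro s c
    rw [List.foldl_cons, tsmWaits_cons]
    by_cases h : ((tsmUnpack e).1 == "RecvW" || (tsmUnpack e).1 == "MediaW") = true
    · simp only [h, if_true]
      set w := tsmSaveint (tsmUnpack e).2
      have hst := tsmSt_cons s w (tsmWaits rest)
      rw [tsmCnt_cons]
      by_cases h6 : w ≥ 600
      · have h3 : w ≥ 300 := by omega
        simp only [h6, if_true] at hst ⊢
        rw [ih, hst, if_pos h3]
        simp only [Prod.mk.injEq]
        exact ⟨trivial, by ring⟩
      · by_cases h3 : w ≥ 300
        · simp only [h6, if_false, h3, if_true] at hst ⊢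
          rw [ih, hst]
          simp only [Prod.mk.injEq]
          exact ⟨trivial, by ring⟩
        · simp only [h6, if_false, h3] at hst ⊢
          rw [ih, hst]
          simp only [Prod.mk.injEq]
          exact ⟨trivial, by ring⟩
    · rw [Bool.not_eq_true] at h
      simp only [h, Bool.false_eq_true, if_false, ih]

-- ===== VERDICT (by name: the statement is the Claim_ definition above) =====
theorem check_tsm_sessions_spec : Claim_equal_check_tsm_sessions := by
  intro item np info _ _
  unfold Spec_check_tsm_sessions check_tsm_sessions check_tsm_sessions_alt
  rw [afold_eq, bfold_eq]
  simp only [List.nil_append, Prod.mk.injEq]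
  refine ⟨?_, ?_⟩
  · unfold tsmSt
    split_ifs <;> simp
  · rw [zero_add]; rfl
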